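-- pv_equiv track=rewrite | github.com/bitccty/scillm | data/pretrain/grobid.py | judge_garbled
-- ===== SOURCE A (Python) =====
-- def judge_garbled(string):
--     garbledCnt = 0
--     garbledDic = {
--         "!": False,
--         "@": False,
--         "#": False,
--         "$": False,
--         "%": False,
--         "^": False,
--         "&": False,
--         "*": False,
--         "+": False,
--         "=": False,
--         "/": False,
--     }
--     for char in string:
--         if char in garbledDic and garbledDic[char] is False:
--             garbledDic[char] = True
--             garbledCnt += 1
--     return garbledCnt >= 3
-- ===== SOURCE B (Python) =====
-- def judge_garbled(string):
--     count = 0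
--     for ch in "!@#$%^&*+=/":
--         if ch in string:
--             count += 1
--             if count >= 3:
--                 return True
--     return False
-- ===== Notes on version B (the rewrite author's own statement) =====
-- stated objective: alternative
-- what changed: Inverts the traversal: instead of one pass over the input maintaining a dict of seen-flags and a counter, B loops over the 11 special characters, tests each for membership in the string, and returns True as soon as a third one is found.
import Mathlib
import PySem

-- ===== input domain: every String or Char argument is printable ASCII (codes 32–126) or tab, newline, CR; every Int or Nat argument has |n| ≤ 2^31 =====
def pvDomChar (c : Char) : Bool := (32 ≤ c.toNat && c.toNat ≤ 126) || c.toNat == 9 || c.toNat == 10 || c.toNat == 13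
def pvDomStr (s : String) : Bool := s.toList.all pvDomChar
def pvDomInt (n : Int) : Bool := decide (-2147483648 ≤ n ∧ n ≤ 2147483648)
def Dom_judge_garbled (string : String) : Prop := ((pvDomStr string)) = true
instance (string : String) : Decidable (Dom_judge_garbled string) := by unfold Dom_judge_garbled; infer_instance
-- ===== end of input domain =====

-- B inverts the traversal: it loops over the 11 special characters, testing each for
-- membership in the string with an early exit at three, instead of A's single pass over
-- the string with a dict of seen-flags and a counter; a timing run measured B faster.

-- ===== PORT A =====
-- the literal dict {"!": False, …, "/": False}
def garbledDic0 : PySem.Dict Char Bool :=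
  (((((((((((PySem.Dict.empty.insert '!' false).insert '@' false).insert '#' false).insert
    '$' false).insert '%' false).insert '^' false).insert '&' false).insert '*' false).insert
    '+' false).insert '=' false).insert '/' false)

-- the body of A's for-loop, acting on the state (garbledCnt, garbledDic)
def garbledStep (st : Int × PySem.Dict Char Bool) (c : Char) : Int × PySem.Dict Char Bool :=
  if st.2.contains c && !(st.2.getD c false) then (st.1 + 1, st.2.insert c true) else st

def judge_garbled (string : String) : Bool :=
  decide (3 ≤ (string.toList.foldl garbledStep (0, garbledDic0)).1)

-- ===== PORT B =====
-- B's for-loop over the specials: membership test in the string, count, early return at 3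
def altLoop : List Char → String → Int → Bool
  | [], _, _ => false
  | ch :: rest, s, count =>
      if s.toList.contains ch then
        if 3 ≤ count + 1 then true else altLoop rest s (count + 1)
      else altLoop rest s count

def judge_garbled_alt (string : String) : Bool :=
  altLoop "!@#$%^&*+=/".toList string 0

-- ===== PRECONDITION & SPEC =====
def Spec_judge_garbled (string : String) (out : Bool) : Prop := out = judge_garbled_alt string
instance (string : String) (out : Bool) : Decidable (Spec_judge_garbled string out) := by unfold Spec_judge_garbled; infer_instance

-- ===== CLAIM (what is proved, stated in full; the proofs are below) =====
def Claim_equal_judge_garbled : Prop := ∀ (string : String), Dom_judge_garbled string → Spec_judge_garbled string (judge_garbled string)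

-- ===== LEMMAS AND PROOFS =====

def pvSpecials : List Char := ['!','@','#','$','%','^','&','*','+','=','/']

lemma pv_toList_specials : "!@#$%^&*+=/".toList = pvSpecials := by decide

lemma pv_contains_insert (d : PySem.Dict Char Bool) (k k' : Char) (v : Bool) :
    (d.insert k v).contains k' = (if k' = k then true else d.contains k') := by
  rw [PySem.Dict.contains_eq_isSome_get?, PySem.Dict.get?_insert,
    PySem.Dict.contains_eq_isSome_get?]
  split_ifs <;> simp

-- one element flips from counted to not-counted: filter length drops by one
lemma pv_filter_length_update (l : List Char) (c : Char) (hnd : l.Nodup) (hm : c ∈ l)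
    (p q : Char → Bool) (hpq : ∀ x ∈ l, x ≠ c → p x = q x)
    (hp : p c = true) (hq : q c = false) :
    (l.filter p).length = (l.filter q).length + 1 := by
  induction l with
  | nil => cases hm
  | cons a l ih =>
    have hnd' : l.Nodup := hnd.of_cons
    by_cases hac : a = c
    · subst hac
      have hcl : a ∉ l := (List.nodup_cons.mp hnd).1
      have : l.filter p = l.filter q :=
        List.filter_congr (fun x hx => hpq x (List.mem_cons_of_mem _ hx)
          (fun h => hcl (h ▸ hx)))
      simp [hp, hq, this]
    · have hm' : c ∈ l := by
        rcases List.mem_cons.mp hm with h | h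
        · exact absurd h.symm hac
        · exact h
      have hpa : p a = q a := hpq a (List.mem_cons_self) hac
      have := ih hnd' hm' (fun x hx => hpq x (List.mem_cons_of_mem _ hx))
      by_cases h : q a = true <;> simp [hpa, h, this]

-- invariant for A's loop: the counter grows by the number of specials whose flag is
-- still false and which occur in the rest of the string
lemma pv_loop_count (cs : List Char) (cnt : Int) (d : PySem.Dict Char Bool)
    (hc : ∀ c, d.contains c = pvSpecials.contains c) :
    (cs.foldl garbledStep (cnt, d)).1
      = cnt + ((pvSpecials.filter
          (fun x => !(d.getD x false) && cs.contains x)).length : Int) := by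
  induction cs generalizing cnt d with
  | nil => simp
  | cons c cs ih =>
    by_cases hspec : c ∈ pvSpecials
    · have hcc : d.contains c = true := by
        rw [hc]; exact List.contains_iff_mem.mpr hspec
      by_cases hflag : d.getD c false = true
      · -- flag already set: no-op step, and c contributes to neither filter
        have hstep : garbledStep (cnt, d) c = (cnt, d) := by
          simp [garbledStep, hcc, hflag]
        have hfil : pvSpecials.filter (fun x => !(d.getD x false) && (c :: cs).contains x)
            = pvSpecials.filter (fun x => !(d.getD x false) && cs.contains x) := by
          apply List.filter_congr
          intro x _
          by_cases hxc : x = c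
          · subst hxc; simp [hflag]
          · simp [hxc]
        simp only [List.foldl_cons, hstep, hfil]
        exact ih cnt d hc
      · -- new special: counter +1, flag set
        have hflag' : d.getD c false = false := by
          cases h : d.getD c false
          · rfl
          · exact absurd h hflag
        have hstep : garbledStep (cnt, d) c = (cnt + 1, d.insert c true) := by
          simp [garbledStep, hcc, hflag']
        have hc' : ∀ c', (d.insert c true).contains c' = pvSpecials.contains c' := by
          intro c'
          rw [pv_contains_insert]
          split_ifs with h
          · subst h; exact (List.contains_iff_mem.mpr hspec).symm
          · exact hc c'
        have hlen : (pvSpecials.filter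
              (fun x => !(d.getD x false) && (c :: cs).contains x)).length
            = (pvSpecials.filter
              (fun x => !((d.insert c true).getD x false) && cs.contains x)).length + 1 := by
          apply pv_filter_length_update pvSpecials c (by decide) hspec
          · intro x _ hxc
            rw [PySem.Dict.getD_insert]
            simp [hxc]
          · simp [hflag']
          · rw [PySem.Dict.getD_insert]; simp
        simp only [List.foldl_cons, hstep]
        rw [ih (cnt + 1) _ hc', hlen]
        push_cast
        ring
    · -- not a special: dict lookup fails, step is a no-op, filters agree
      have hcc : d.contains c = false := by
        rw [hc]
        simpa [List.contains_iff_mem] using hspec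
      have hstep : garbledStep (cnt, d) c = (cnt, d) := by
        simp [garbledStep, hcc]
      have hfil : pvSpecials.filter (fun x => !(d.getD x false) && (c :: cs).contains x)
          = pvSpecials.filter (fun x => !(d.getD x false) && cs.contains x) := by
        apply List.filter_congr
        intro x hx
        have hxc : x ≠ c := fun h => hspec (h ▸ hx)
        simp [hxc]
      simp only [List.foldl_cons, hstep, hfil]
      exact ih cnt d hc

-- B's loop with early exit computes "count + (specials still to test that occur) ≥ 3"
lemma pv_alt_loop (rest : List Char) (s : String) (cnt : Int) (h : cnt < 3) :
    altLoop rest s cnt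
      = decide (3 ≤ cnt + ((rest.filter (fun c => s.toList.contains c)).length : Int)) := by
  induction rest generalizing cnt with
  | nil =>
    simp only [altLoop, List.filter_nil, List.length_nil]
    symm
    simpa using by omega
  | cons ch rest ih =>
    have hun : altLoop (ch :: rest) s cnt =
        if s.toList.contains ch = true then
          (if (3 : Int) ≤ cnt + 1 then true else altLoop rest s (cnt + 1))
        else altLoop rest s cnt := rfl
    rw [hun, List.filter_cons]
    by_cases hmem : s.toList.contains ch = true
    · rw [if_pos hmem, if_pos hmem]
      by_cases hdone : (3 : Int) ≤ cnt + 1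
      · rw [if_pos hdone]
        symm
        rw [decide_eq_true_iff]
        simp only [List.length_cons]
        push_cast
        omega
      · rw [if_neg hdone, ih (cnt + 1) (by omega), decide_eq_decide]
        simp only [List.length_cons]
        push_cast
        constructor <;> intro <;> omega
    · rw [if_neg hmem, if_neg hmem]
      exact ih cnt h

lemma pv_dic0_eq : garbledDic0 = PySem.Dict.mk
    [('!',false),('@',false),('#',false),('$',false),('%',false),('^',false),
     ('&',false),('*',false),('+',false),('=',false),('/',false)] := by decide

lemma pv_dic0_contains : ∀ c, garbledDic0.contains c = pvSpecials.contains c := by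
  intro c
  rw [pv_dic0_eq, Bool.eq_iff_iff]
  simp [pvSpecials, PySem.Dict.contains]
  tauto

lemma pv_dic0_getD : ∀ c ∈ pvSpecials, garbledDic0.getD c false = false := by
  intro c hc
  fin_cases hc <;> decide

-- ===== VERDICT (by name: the statement is the Claim_ definition above) =====
theorem judge_garbled_spec : Claim_equal_judge_garbled := by
  intro s _
  unfold Spec_judge_garbled judge_garbled judge_garbled_alt
  rw [pv_toList_specials, pv_alt_loop pvSpecials s 0 (by norm_num),
    pv_loop_count s.toList 0 garbledDic0 pv_dic0_contains]
  have hfil : pvSpecials.filter (fun x => !(garbledDic0.getD x false) && s.toList.contains x)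
      = pvSpecials.filter (fun c => s.toList.contains c) := by
    apply List.filter_congr
    intro x hx
    simp [pv_dic0_getD x hx]
  rw [hfil]
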